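-- pv_equiv track=rewrite | github.com/bowmanonjupiter2/everyday-coding-challenge-python | find_balanced_sub_array.py | find_the_target_element
-- ===== SOURCE A (Python) =====
-- def find_the_target_element(source_list: list, target: int) -> list:
--     if target in source_list:
--         return [target]
--     else:
--         for i in source_list:
--             new_source_list = source_list.copy()
--             new_source_list.remove(i)
--             new_target = target - i
--             result = [i]
--             result.extend(find_the_target_element(new_source_list, new_target))
--             return result
--         return []
-- ===== SOURCE B (Python) =====
-- def find_the_target_element(source_list: list, target: int) -> list:
--     # O(n): last-occurrence index per value; want is in the suffix source_list[k:]
--     # iff its last occurrence index is >= k.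
--     last = {}
--     for i, v in enumerate(source_list):
--         last[v] = i
--     prefix = 0
--     for k, v in enumerate(source_list):
--         want = target - prefix
--         if last.get(want, -1) >= k:
--             return source_list[:k] + [want]
--         prefix += v
--     return list(source_list)
-- ===== Notes on version B (the rewrite author's own statement) =====
-- stated objective: faster
-- what changed: Replaced the recursive peel-and-rescan (a linear membership test of the whole remaining list at every level) by a single pass over the list with a running prefix sum and a last-occurrence index dictionary built once, so the suffix-membership test becomes one O(1) lookup.
import Mathlib
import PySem

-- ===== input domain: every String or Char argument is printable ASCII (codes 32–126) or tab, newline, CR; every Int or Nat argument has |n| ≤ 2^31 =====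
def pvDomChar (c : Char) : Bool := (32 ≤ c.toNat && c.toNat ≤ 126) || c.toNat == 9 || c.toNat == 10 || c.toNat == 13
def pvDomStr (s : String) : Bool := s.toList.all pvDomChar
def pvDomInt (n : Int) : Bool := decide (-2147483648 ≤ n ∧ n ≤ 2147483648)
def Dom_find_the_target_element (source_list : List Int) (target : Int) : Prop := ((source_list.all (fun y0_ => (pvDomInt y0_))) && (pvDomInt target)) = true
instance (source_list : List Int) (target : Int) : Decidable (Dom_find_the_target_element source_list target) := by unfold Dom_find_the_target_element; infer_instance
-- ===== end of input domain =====

-- B replaces A's recursive peel-and-rescan (O(n^2)) by one pass with a prefix sum and a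
-- last-occurrence dictionary (O(n)); objective: faster, asymptotic.

-- ===== PORT A =====
-- A: if target in list return [target]; else (for-loop returns on the FIRST element)
-- remove the head, recurse on the tail with target - head, prepend the head; [] on empty.
def find_the_target_element (source_list : List Int) (target : Int) : List Int :=
  if source_list.contains target then [target]
  else
    match source_list with
    | [] => []
    | i :: rest => i :: find_the_target_element rest (target - i)

-- ===== PORT B =====
-- last = {}; for i, v in enumerate(source_list): last[v] = i
def pvLastB (xs : List Int) : PySem.Dict Int Int :=
  (PySem.List.enumerate xs).foldl (fun d p => d.insert p.2 p.1) PySem.Dict.empty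

-- the scan loop of Source B: k, v over enumerate(source_list) with running prefix sum;
-- source_list[:k] with k a nonneg counter is exactly take k.
def pvScanB (orig : List Int) (last : PySem.Dict Int Int) (t : Int) :
    List Int → Nat → Int → List Int
  | [], _, _ => orig
  | v :: rest, k, pfx =>
    if (k : Int) ≤ last.getD (t - pfx) (-1) then orig.take k ++ [t - pfx]
    else pvScanB orig last t rest (k + 1) (pfx + v)

def find_the_target_element_alt (source_list : List Int) (target : Int) : List Int :=
  pvScanB source_list (pvLastB source_list) target source_list 0 0

-- ===== PRECONDITION & SPEC =====
def Spec_find_the_target_element (source_list : List Int) (target : Int) (out : List Int) : Prop := out = find_the_target_element_alt source_list target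
instance (source_list : List Int) (target : Int) (out : List Int) : Decidable (Spec_find_the_target_element source_list target out) := by unfold Spec_find_the_target_element; infer_instance

-- ===== CLAIM (what is proved, stated in full; the proofs are below) =====
def Claim_equal_find_the_target_element : Prop := ∀ (source_list : List Int) (target : Int), Dom_find_the_target_element source_list target → Spec_find_the_target_element source_list target (find_the_target_element source_list target)

-- ===== LEMMAS AND PROOFS =====

lemma pv_enumerate_append_singleton (ys : List Int) (a : Int) :
    ∀ s : Int, PySem.List.enumerate (ys ++ [a]) s
      = PySem.List.enumerate ys s ++ [(s + ys.length, a)] := by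
  induction ys with
  | nil => intro s; simp [PySem.List.enumerate_nil, PySem.List.enumerate_cons]
  | cons y ys ih =>
      intro s
      simp [PySem.List.enumerate_cons, ih (s + 1)]
      ring_nf

lemma pvLastB_append (ys : List Int) (a : Int) :
    pvLastB (ys ++ [a]) = (pvLastB ys).insert a (ys.length : Int) := by
  unfold pvLastB
  rw [pv_enumerate_append_singleton ys a 0, List.foldl_append]
  simp

-- last-occurrence characterisation: the dict lookup tests suffix membership
lemma pvLastB_mem_iff (xs : List Int) :
    ∀ (v : Int) (k : Nat), ((k : Int) ≤ (pvLastB xs).getD v (-1)) ↔ v ∈ xs.drop k := by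
  induction xs using List.reverseRecOn with
  | nil =>
      intro v k
      simp [pvLastB, PySem.List.enumerate_nil, PySem.Dict.getD_empty]
      omega
  | append_singleton ys a ih =>
      intro v k
      rw [pvLastB_append, PySem.Dict.getD_insert]
      by_cases hva : v = a
      · subst hva
        rw [if_pos rfl]
        constructor
        · intro hk
          have hk' : k ≤ ys.length := by exact_mod_cast hk
          rw [List.drop_append_of_le_length hk']
          simp
        · intro hmem
          by_contra h
          have hk' : ys.length < k := by
            by_contra h2
            exact h (by exact_mod_cast Nat.le_of_not_lt h2)
          have hnil : (ys ++ [v]).drop k = [] := by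
            apply List.drop_eq_nil_of_le
            simp only [List.length_append, List.length_singleton]
            omega
          rw [hnil] at hmem
          simp at hmem
      · rw [if_neg hva, ih v k]
        by_cases hk : k ≤ ys.length
        · rw [List.drop_append_of_le_length hk]
          simp [hva]
        · have h1 : (ys ++ [a]).drop k = [] := by
            apply List.drop_eq_nil_of_le
            simp only [List.length_append, List.length_singleton]
            omega
          have h2 : ys.drop k = [] := List.drop_eq_nil_of_le (by omega)
          rw [h1, h2]

lemma pvScanB_eq (orig : List Int) (t0 : Int) :
    ∀ (m k : Nat), k + m = orig.length →
      pvScanB orig (pvLastB orig) t0 (orig.drop k) k ((orig.take k).sum)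
        = orig.take k ++ find_the_target_element (orig.drop k) (t0 - (orig.take k).sum) := by
  intro m
  induction m with
  | zero =>
      intro k hk
      have hd : orig.drop k = [] := List.drop_eq_nil_of_le (by omega)
      have ht : orig.take k = orig := List.take_of_length_le (by omega)
      rw [hd, ht]
      simp [pvScanB, find_the_target_element]
  | succ m ih =>
      intro k hk
      have hklt : k < orig.length := by omega
      have hd : orig.drop k = orig[k] :: orig.drop (k + 1) := (List.getElem_cons_drop hklt).symm
      rw [hd]
      rw [find_the_target_element]
      have hmem := pvLastB_mem_iff orig (t0 - (orig.take k).sum) k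
      rw [hd] at hmem
      by_cases hc : (t0 - (orig.take k).sum) ∈ orig[k] :: orig.drop (k + 1)
      · have hcond : (k : Int) ≤ (pvLastB orig).getD (t0 - (orig.take k).sum) (-1) :=
          hmem.mpr hc
        have hcontains : (orig[k] :: orig.drop (k + 1)).contains (t0 - (orig.take k).sum) = true := by
          simpa [List.contains_iff_mem] using hc
        rw [pvScanB, if_pos hcond, if_pos hcontains]
      · have hcond : ¬ ((k : Int) ≤ (pvLastB orig).getD (t0 - (orig.take k).sum) (-1)) := by
          intro h; exact hc (hmem.mp h)
        have hcontains : (orig[k] :: orig.drop (k + 1)).contains (t0 - (orig.take k).sum) = false := by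
          simpa [List.contains_iff_mem] using hc
        rw [pvScanB, if_neg hcond, hcontains]
        simp only [Bool.false_eq_true, if_false]
        have htake : orig.take (k + 1) = orig.take k ++ [orig[k]] := by
          rw [List.take_add_one, List.getElem?_eq_getElem hklt]
          simp
        have hsum : (orig.take (k + 1)).sum = (orig.take k).sum + orig[k] := by
          rw [htake, List.sum_append]; simp
        have := ih (k + 1) (by omega)
        rw [hsum] at this
        have harith : t0 - ((orig.take k).sum + orig[k]) = t0 - (orig.take k).sum - orig[k] := by ring
        rw [this, harith, htake, List.append_assoc, List.singleton_append]

-- ===== VERDICT (by name: the statement is the Claim_ definition above) =====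
theorem find_the_target_element_spec : Claim_equal_find_the_target_element := by
  intro xs t _
  unfold Spec_find_the_target_element find_the_target_element_alt
  have h := pvScanB_eq xs t xs.length 0 (by omega)
  simpa using h.symm
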